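-- pv_equiv track=rewrite | github.com/ymtz13/CompetitiveProgramming | AtCoder/ACL1/hA.py | solve_exact
-- ===== SOURCE A (Python) =====
-- class UF:
--     def __init__(self, N):
--         self.uf = [-1]*N
--         self.n = N
--
--     def find(self, x):
--         if self.uf[x]<0: return x
--         self.uf[x] = self.find(self.uf[x])
--         return self.uf[x]
--
--     def size(self, x):
--         return -self.uf[self.find(x)]
--
--     def union(self, x, y):
--         x, y = self.find(x), self.find(y)
--         if x==y: return
--         if self.size(x) > self.size(y): x, y = y, x
--         self.uf[y] += self.uf[x]
--         self.uf[x] = y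
--         self.n -= 1
--
-- def solve_exact(XYI):
--     N = len(XYI)
--     uf = UF(N)
--
--     ans = [1]*N
--     for p in range(N):
--         xp, yp, ip = XYI[p]
--         for q in range(p+1, N):
--             xq, yq, iq = XYI[q]
--             if (xp>xq and yp>yq) or (xp<xq and yp<yq):
--                 uf.union(ip, iq)
--     return [uf.size(i) for i in range(N)]
-- ===== SOURCE B (Python) =====
-- def solve_exact(XYI):
--     N = len(XYI)
--     lab = list(range(N))
--     for p in range(N):
--         xp, yp, ip = XYI[p]
--         for q in range(p + 1, N):
--             xq, yq, iq = XYI[q]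
--             if (xp > xq and yp > yq) or (xp < xq and yp < yq):
--                 la, lb = lab[ip], lab[iq]
--                 if la != lb:
--                     lab = [la if l == lb else l for l in lab]
--     return [lab.count(lab[i]) for i in range(N)]
-- ===== Notes on version B (the rewrite author's own statement) =====
-- stated objective: alternative
-- what changed: B replaces A's size-balanced path-compressing union-find (parent/size array with recursive find) by a flat component-label list: a merge relabels one component's label everywhere and the answer for each node is the count of its own label; constant-factor speedup from dropping per-pair method calls.
-- outside the precondition, e.g. on solve_exact([(0, 0, 0), (1, 1, -1)]): A returns [1, 2], B returns [2, 2]; on solve_exact([(0, 0, -1), (1, 1, 1)]): A raises RecursionError, B returns [1, 1]; on solve_exact([(0, 0, 0), (1, 1, 2)]): A raises IndexError, B raises IndexError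
import Mathlib
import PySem

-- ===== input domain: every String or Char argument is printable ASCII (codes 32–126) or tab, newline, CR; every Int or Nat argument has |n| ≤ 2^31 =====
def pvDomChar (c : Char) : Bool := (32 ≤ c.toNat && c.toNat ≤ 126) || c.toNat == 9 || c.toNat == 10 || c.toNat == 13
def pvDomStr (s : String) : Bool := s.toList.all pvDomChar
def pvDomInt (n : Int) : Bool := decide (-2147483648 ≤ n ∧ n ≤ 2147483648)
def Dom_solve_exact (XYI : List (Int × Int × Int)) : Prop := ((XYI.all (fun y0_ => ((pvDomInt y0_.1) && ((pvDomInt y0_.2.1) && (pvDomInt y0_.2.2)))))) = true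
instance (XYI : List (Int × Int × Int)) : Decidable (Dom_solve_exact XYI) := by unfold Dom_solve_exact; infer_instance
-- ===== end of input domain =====

-- B replaces A's size-balanced path-compressing union-find by a flat component-label list
-- (merge = relabel, answer = count of own label): a different data structure, measured modestly
-- faster by a constant factor (no per-pair method calls).

-- ===== PORT A =====
-- self.uf[x] (read): Python list read; under Pre_ all indices used are in range, so the default is never taken.
def pyg (l : List Int) (x : Int) : Int := (PySem.List.pyGet? l x).getD 0

-- self.uf[x] = v (write); exact for 0 ≤ x < len, the only case reached under Pre_.
def pyset (l : List Int) (x : Int) (v : Int) : List Int := PySem.List.pySetD l x v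

-- UF.find with path compression; Python's recursion is unbounded, fuel = len(uf) suffices
-- because parent chains are acyclic and visit distinct indices (the 0-fuel branch is unreachable under Pre_).
def ufFind : Nat → List Int → Int → List Int × Int
  | 0, uf, x => (uf, x)
  | fuel+1, uf, x =>
    if pyg uf x < 0 then (uf, x)
    else
      let r := ufFind fuel uf (pyg uf x)
      let uf2 := pyset r.1 x r.2
      (uf2, pyg uf2 x)

-- UF.size
def ufSize (uf : List Int) (x : Int) : List Int × Int :=
  let f := ufFind uf.length uf x
  (f.1, -(pyg f.1 f.2))

-- UF.union (threads (uf, n); n is UF.n, dead for the result but carried faithfully)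
def ufUnion (uf : List Int) (n : Int) (x y : Int) : List Int × Int :=
  let f1 := ufFind uf.length uf x
  let f2 := ufFind f1.1.length f1.1 y
  let x1 := f1.2
  let y1 := f2.2
  let uf2 := f2.1
  if x1 = y1 then (uf2, n)
  else
    let s1 := ufSize uf2 x1
    let s2 := ufSize s1.1 y1
    let ab : Int × Int := if s2.2 < s1.2 then (y1, x1) else (x1, y1)
    let uf3 := pyset s2.1 ab.2 (pyg s2.1 ab.2 + pyg s2.1 ab.1)
    let uf4 := pyset uf3 ab.1 ab.2
    (uf4, n - 1)

-- inner 'for q in range(p+1, N)' body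
def aInner (xp yp ip : Int) (XYI : List (Int × Int × Int)) (st : List Int × Int) (q : Int) :
    List Int × Int :=
  let t := (PySem.List.pyGet? XYI q).getD (0, 0, 0)
  if (xp > t.1 ∧ yp > t.2.1) ∨ (xp < t.1 ∧ yp < t.2.1) then ufUnion st.1 st.2 ip t.2.2 else st

-- outer 'for p in range(N)' body
def aOuter (XYI : List (Int × Int × Int)) (st : List Int × Int) (p : Int) : List Int × Int :=
  let t := (PySem.List.pyGet? XYI p).getD (0, 0, 0)
  (PySem.List.pyRange (p + 1) XYI.length 1).foldl (aInner t.1 t.2.1 t.2.2 XYI) st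

def solve_exact (XYI : List (Int × Int × Int)) : List Int :=
  let N : Int := XYI.length
  let st := (PySem.List.pyRange 0 N 1).foldl (aOuter XYI) (List.replicate XYI.length (-1), N)
  -- [uf.size(i) for i in range(N)] : size mutates uf (path compression), so the state is threaded
  ((PySem.List.pyRange 0 N 1).foldl
    (fun acc i => let s := ufSize acc.1 i; (s.1, acc.2 ++ [s.2])) (st.1, ([] : List Int))).2

-- ===== PORT B =====
-- merge of the two labels lab[ip], lab[iq] (the body of B's 'if comparable:' branch)
def bMerge (lab : List Int) (ip iq : Int) : List Int :=
  let la := pyg lab ip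
  let lb := pyg lab iq
  if la ≠ lb then lab.map (fun l => if l = lb then la else l) else lab

def bInner (xp yp ip : Int) (XYI : List (Int × Int × Int)) (lab : List Int) (q : Int) :
    List Int :=
  let t := (PySem.List.pyGet? XYI q).getD (0, 0, 0)
  if (xp > t.1 ∧ yp > t.2.1) ∨ (xp < t.1 ∧ yp < t.2.1) then bMerge lab ip t.2.2 else lab

def bOuter (XYI : List (Int × Int × Int)) (lab : List Int) (p : Int) : List Int :=
  let t := (PySem.List.pyGet? XYI p).getD (0, 0, 0)
  (PySem.List.pyRange (p + 1) XYI.length 1).foldl (bInner t.1 t.2.1 t.2.2 XYI) lab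

def solve_exact_alt (XYI : List (Int × Int × Int)) : List Int :=
  let N : Int := XYI.length
  let lab := (PySem.List.pyRange 0 N 1).foldl (bOuter XYI) (PySem.List.pyRange 0 N 1)
  (PySem.List.pyRange 0 N 1).map (fun i => (PySem.List.count lab (pyg lab i) : Int))

-- ===== PRECONDITION & SPEC =====
-- Pre_ requires 0 ≤ id < len(XYI) for the ids of every strictly-comparable pair of points (the only
-- ids either program ever touches): an id outside [-N, N) in such a pair makes A raise IndexError,
-- and a negative id in such a pair makes A's recursive find overflow the stack (RecursionError) on
-- typical inputs or, where it does return, yields a value depending on Python's negative-index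
-- wraparound, an artefact of A's list-backed union-find.
def Pre_solve_exact (XYI : List (Int × Int × Int)) : Prop :=
  ∀ t ∈ XYI, ∀ u ∈ XYI,
    ((t.1 > u.1 ∧ t.2.1 > u.2.1) ∨ (t.1 < u.1 ∧ t.2.1 < u.2.1)) →
    (0 ≤ t.2.2 ∧ t.2.2 < (XYI.length : Int)) ∧ (0 ≤ u.2.2 ∧ u.2.2 < (XYI.length : Int))
instance (XYI : List (Int × Int × Int)) : Decidable (Pre_solve_exact XYI) := by
  unfold Pre_solve_exact; infer_instance

def pvWitness_solve_exact : (List (Int × Int × Int)) := [(0, 1, 0), (2, 0, 1)]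

def Spec_solve_exact (XYI : List (Int × Int × Int)) (out : List Int) : Prop := out = solve_exact_alt XYI
instance (XYI : List (Int × Int × Int)) (out : List Int) : Decidable (Spec_solve_exact XYI out) := by unfold Spec_solve_exact; infer_instance

-- ===== CLAIM (what is proved, stated in full; the proofs are below) =====
def Claim_equal_solve_exact : Prop := ∀ (XYI : List (Int × Int × Int)), Dom_solve_exact XYI → Pre_solve_exact XYI → Spec_solve_exact XYI (solve_exact XYI)

-- ===== LEMMAS AND PROOFS =====

-- the union-find forest invariant: rt is the root map, h a strict height measure along parent links
def InvF (uf : List Int) (rt : Int → Int) (h : Int → Nat) : Prop :=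
  ∀ x : Int, 0 ≤ x → x < (uf.length : Int) →
    (0 ≤ rt x ∧ rt x < (uf.length : Int) ∧ pyg uf (rt x) < 0) ∧
    (pyg uf x < 0 → rt x = x) ∧
    (0 ≤ pyg uf x → pyg uf x < (uf.length : Int) ∧ rt (pyg uf x) = rt x ∧ h (pyg uf x) < h x)

-- coupling of A's forest with B's label list: same classes, sizes stored at roots = label counts
def InvC (uf lab : List Int) (rt : Int → Int) (h : Int → Nat) : Prop :=
  uf.length = lab.length ∧ InvF uf rt h ∧
  (∀ x y : Int, 0 ≤ x → x < (uf.length : Int) → 0 ≤ y → y < (uf.length : Int) →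
    (rt x = rt y ↔ pyg lab x = pyg lab y)) ∧
  (∀ x : Int, 0 ≤ x → x < (uf.length : Int) →
    pyg uf (rt x) = -(lab.count (pyg lab x) : Int)) ∧
  (∀ x : Int, 0 ≤ x → x < (uf.length : Int) → h x < lab.count (pyg lab x))

def UFRel (uf lab : List Int) : Prop := ∃ rt h, InvC uf lab rt h

lemma pyg_nonneg (l : List Int) (x : Int) (h0 : 0 ≤ x) : pyg l x = l.getD x.toNat 0 := by
  rw [pyg, PySem.List.pyGet?_of_nonneg _ h0]; rfl

lemma pyset_nonneg (l : List Int) (x v : Int) (h0 : 0 ≤ x) : pyset l x v = l.set x.toNat v := by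
  rw [pyset, PySem.List.pySetD_of_nonneg _ _ h0]

lemma length_pyset (l : List Int) (x v : Int) : (pyset l x v).length = l.length := by
  simp [pyset, PySem.List.length_pySetD]

lemma pyg_pyset_self (l : List Int) (x v : Int) (h0 : 0 ≤ x) (h1 : x < (l.length : Int)) :
    pyg (pyset l x v) x = v := by
  have hx : x.toNat < l.length := by omega
  rw [pyg_nonneg _ _ h0, pyset_nonneg _ _ _ h0]
  simp [List.getD, hx]

lemma pyg_pyset_ne (l : List Int) (x y v : Int) (h0 : 0 ≤ x) (h1 : 0 ≤ y) (hne : y ≠ x) :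
    pyg (pyset l x v) y = pyg l y := by
  have hxy : x.toNat ≠ y.toNat := by omega
  rw [pyg_nonneg _ _ h1, pyg_nonneg _ _ h1, pyset_nonneg _ _ _ h0]
  simp [List.getD, List.getElem?_set_ne hxy]

lemma ufFind_spec (rt : Int → Int) (h : Int → Nat) :
    ∀ (fuel : Nat) (uf : List Int) (x : Int), InvF uf rt h → 0 ≤ x → x < (uf.length : Int) →
      h x < fuel →
      (ufFind fuel uf x).2 = rt x ∧
      (ufFind fuel uf x).1.length = uf.length ∧
      InvF (ufFind fuel uf x).1 rt h ∧
      (∀ j : Int, 0 ≤ j → pyg uf j < 0 → pyg (ufFind fuel uf x).1 j = pyg uf j) ∧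
      (∀ j : Int, 0 ≤ j → 0 ≤ pyg uf j → 0 ≤ pyg (ufFind fuel uf x).1 j) ∧
      h (rt x) ≤ h x := by
  intro fuel
  induction fuel with
  | zero => intro uf x _ _ _ hfx; omega
  | succ m ih =>
    intro uf x hI h0 h1 hfx
    by_cases hneg : pyg uf x < 0
    · have hrt : rt x = x := (hI x h0 h1).2.1 hneg
      have hunf : ufFind (m+1) uf x = (uf, x) := by
        simp only [ufFind]; rw [if_pos hneg]
      rw [hunf]
      exact ⟨hrt.symm, rfl, hI, fun _ _ _ => rfl, fun _ _ hj => hj, le_of_eq (congrArg h hrt)⟩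
    · rw [not_lt] at hneg
      obtain ⟨hvlen, hvrt, hvh⟩ := (hI x h0 h1).2.2 hneg
      have hxroot := (hI x h0 h1).1
      obtain ⟨ihr, ihlen, ihI, ihneg, ihsgn, ihh⟩ :=
        ih uf (pyg uf x) hI hneg hvlen (by omega)
      have hunf : ufFind (m+1) uf x =
          (pyset (ufFind m uf (pyg uf x)).1 x (ufFind m uf (pyg uf x)).2,
           pyg (pyset (ufFind m uf (pyg uf x)).1 x (ufFind m uf (pyg uf x)).2) x) := by
        simp only [ufFind]; rw [if_neg (not_lt.mpr hneg)]
      set r := ufFind m uf (pyg uf x) with hrdef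
      have hr2 : r.2 = rt x := by rw [ihr, hvrt]
      have hx1 : x < (r.1.length : Int) := by rw [ihlen]; exact h1
      have hself : pyg (pyset r.1 x r.2) x = rt x := by
        rw [pyg_pyset_self r.1 x r.2 h0 hx1, hr2]
      have hlen2 : (pyset r.1 x r.2).length = uf.length := by
        rw [length_pyset, ihlen]
      have hrtx0 : 0 ≤ rt x := hxroot.1
      have hrtx1 : rt x < (uf.length : Int) := hxroot.2.1
      have hrtxr : rt (rt x) = rt x := (hI (rt x) hrtx0 hrtx1).2.1 hxroot.2.2
      have hhrt : h (rt x) < h x := by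
        have := ihh; rw [hvrt] at this; omega
      -- x is not a root of uf, hence never equals rt y for y in range
      have hxne : ∀ y : Int, 0 ≤ y → y < (uf.length : Int) → rt y ≠ x := by
        intro y hy0 hy1 hcon
        have := (hI y hy0 hy1).1.2.2
        rw [hcon] at this; omega
      have hsgnx : 0 ≤ pyg r.1 x := ihsgn x h0 hneg
      rw [hunf]
      refine ⟨hself, hlen2, ?_, ?_, ?_, le_of_lt hhrt⟩
      · -- InvF of the compressed array
        intro y hy0 hy1
        rw [hlen2] at hy1
        have hy1r : y < (r.1.length : Int) := by rw [ihlen]; exact hy1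
        obtain ⟨iC1, iC2, iC3⟩ := ihI y hy0 hy1r
        have hroot2 : pyg (pyset r.1 x r.2) (rt y) < 0 := by
          rw [pyg_pyset_ne r.1 x (rt y) r.2 h0 (hI y hy0 hy1).1.1 (hxne y hy0 hy1)]
          exact iC1.2.2
        refine ⟨⟨iC1.1, by rw [hlen2]; exact (hI y hy0 hy1).1.2.1, hroot2⟩, ?_, ?_⟩
        · intro hneg2
          by_cases hyx : y = x
          · exfalso; rw [hyx, hself] at hneg2; omega
          · rw [pyg_pyset_ne r.1 x y r.2 h0 hy0 hyx] at hneg2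
            exact iC2 hneg2
        · intro hpos2
          by_cases hyx : y = x
          · subst hyx
            rw [hself]
            exact ⟨by rw [hlen2]; exact hrtx1, hrtxr, hhrt⟩
          · rw [pyg_pyset_ne r.1 x y r.2 h0 hy0 hyx] at hpos2 ⊢
            obtain ⟨w1, w2, w3⟩ := iC3 hpos2
            exact ⟨by rw [hlen2, ← ihlen]; exact w1, w2, w3⟩
      · intro j hj0 hjneg
        have hjx : j ≠ x := by intro hc; rw [hc] at hjneg; omega
        rw [pyg_pyset_ne r.1 x j r.2 h0 hj0 hjx]
        exact ihneg j hj0 hjneg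
      · intro j hj0 hjpos
        by_cases hjx : j = x
        · rw [hjx, hself]; exact hrtx0
        · rw [pyg_pyset_ne r.1 x j r.2 h0 hj0 hjx]
          exact ihsgn j hj0 hjpos

lemma ufFind_root (fuel : Nat) (uf : List Int) (x : Int) (hf : 0 < fuel) (hx : pyg uf x < 0) :
    ufFind fuel uf x = (uf, x) := by
  cases fuel with
  | zero => omega
  | succ n => simp [ufFind, hx]

-- find preserves the coupling and returns the root
lemma ufFind_invC (uf lab : List Int) (rt : Int → Int) (h : Int → Nat) (x : Int)
    (hInv : InvC uf lab rt h) (h0 : 0 ≤ x) (h1 : x < (uf.length : Int)) :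
    (ufFind uf.length uf x).2 = rt x ∧
    (ufFind uf.length uf x).1.length = uf.length ∧
    InvC (ufFind uf.length uf x).1 lab rt h := by
  obtain ⟨hlen, hF, hLab, hSz, hH⟩ := hInv
  have hfuel : h x < uf.length := by
    have h5 := hH x h0 h1
    have hle : lab.count (pyg lab x) ≤ lab.length := List.count_le_length
    omega
  obtain ⟨hr, hl, hI, hneg, _, _⟩ := ufFind_spec rt h uf.length uf x hF h0 h1 hfuel
  refine ⟨hr, hl, by rw [hl]; exact hlen, hI, by rw [hl]; exact hLab, ?_, by rw [hl]; exact hH⟩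
  intro z hz0 hz1
  rw [hl] at hz1
  have hroot := (hF z hz0 hz1).1
  rw [hneg (rt z) hroot.1 hroot.2.2]
  exact hSz z hz0 hz1

lemma count_map_relabel_eq (lab : List Int) (la lb : Int) (hne : la ≠ lb) :
    (lab.map (fun l => if l = lb then la else l)).count la = lab.count la + lab.count lb := by
  induction lab with
  | nil => simp
  | cons hd tl ih =>
    by_cases h : hd = lb
    · simp [h, hne.symm, ih]; omega
    · by_cases h2 : hd = la
      · simp [h2, hne, ih]; omega
      · simp [h, h2, ih]

lemma count_map_relabel_ne (lab : List Int) (la lb c : Int) (h1 : c ≠ la) (h2 : c ≠ lb) :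
    (lab.map (fun l => if l = lb then la else l)).count c = lab.count c := by
  induction lab with
  | nil => simp
  | cons hd tl ih =>
    by_cases h : hd = lb
    · simp [h, h1.symm, h2.symm, ih]
    · simp [List.count_cons, ih, h]

lemma pyg_map (lab : List Int) (f : Int → Int) (x : Int) (h0 : 0 ≤ x)
    (h1 : x < (lab.length : Int)) : pyg (lab.map f) x = f (pyg lab x) := by
  have hx : x.toNat < lab.length := by omega
  rw [pyg_nonneg _ _ h0, pyg_nonneg _ _ h0]
  simp [List.getD, hx]

-- merging two root classes: A attaches root a under root b, B relabels lq to lp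
lemma merge_spec (uf2 lab : List Int) (rt : Int → Int) (h : Int → Nat) (a b lp lq : Int)
    (hInv : InvC uf2 lab rt h)
    (ha0 : 0 ≤ a) (ha1 : a < (uf2.length : Int)) (hb0 : 0 ≤ b) (hb1 : b < (uf2.length : Int))
    (haneg : pyg uf2 a < 0) (hbneg : pyg uf2 b < 0) (hab : a ≠ b)
    (hlab : (pyg lab a = lp ∧ pyg lab b = lq) ∨ (pyg lab a = lq ∧ pyg lab b = lp)) :
    UFRel (pyset (pyset uf2 b (pyg uf2 b + pyg uf2 a)) a b)
      (lab.map (fun l => if l = lq then lp else l)) := by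
  obtain ⟨hlen, hF, hLab, hSz, hH⟩ := hInv
  have hrta : rt a = a := (hF a ha0 ha1).2.1 haneg
  have hrtb : rt b = b := (hF b hb0 hb1).2.1 hbneg
  set L := uf2.length with hL
  set m := pyg uf2 b + pyg uf2 a with hm
  set uf3 := pyset uf2 b m with huf3
  set uf4 := pyset uf3 a b with huf4
  have hlen3 : uf3.length = L := length_pyset uf2 b m
  have hlen4 : uf4.length = L := by rw [huf4, length_pyset, hlen3]
  have hva : pyg uf4 a = b := pyg_pyset_self uf3 a b ha0 (by rw [hlen3]; exact ha1)
  have hvb : pyg uf4 b = m := by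
    rw [huf4, pyg_pyset_ne uf3 a b b ha0 hb0 (Ne.symm hab), huf3,
      pyg_pyset_self uf2 b m hb0 hb1]
  have hvo : ∀ j : Int, 0 ≤ j → j ≠ a → j ≠ b → pyg uf4 j = pyg uf2 j := by
    intro j hj0 hja hjb
    rw [huf4, pyg_pyset_ne uf3 a j b ha0 hj0 hja, huf3, pyg_pyset_ne uf2 b j m hb0 hj0 hjb]
  have hm0 : m < 0 := by omega
  set La := pyg lab a with hLa
  set Lb := pyg lab b with hLb
  have hLaLb : La ≠ Lb := by
    intro hc
    have := (hLab a b ha0 ha1 hb0 hb1).mpr hc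
    rw [hrta, hrtb] at this; exact hab this
  have hlplq : lp ≠ lq := by
    rcases hlab with ⟨h1, h2⟩ | ⟨h1, h2⟩
    · intro hc; exact hLaLb (by rw [h1, h2, hc])
    · intro hc; exact hLaLb (by rw [h1, h2, hc])
  set F := fun l : Int => if l = lq then lp else l with hFdef
  set lab' := lab.map F with hlab'
  have hlablen : lab.length = L := hlen.symm
  have hlv : ∀ j : Int, 0 ≤ j → j < (L : Int) → pyg lab' j = F (pyg lab j) := by
    intro j hj0 hj1
    exact pyg_map lab F j hj0 (by rw [hlablen]; exact hj1)
  have hcA : pyg uf2 a = -(lab.count La : Int) := by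
    have := hSz a ha0 ha1; rw [hrta] at this; exact this
  have hcB : pyg uf2 b = -(lab.count Lb : Int) := by
    have := hSz b hb0 hb1; rw [hrtb] at this; exact this
  have hm' : m = -((lab.count La : Int) + (lab.count Lb : Int)) := by
    rw [hm, hcA, hcB]; ring
  have hcount_lp : lab'.count lp = lab.count La + lab.count Lb := by
    rw [hlab', hFdef, count_map_relabel_eq lab lp lq hlplq]
    rcases hlab with ⟨h1, h2⟩ | ⟨h1, h2⟩
    · rw [← h1, ← h2]
    · rw [← h1, ← h2]; omega
  have hmema : ∀ z : Int, 0 ≤ z → z < (L : Int) → (rt z = a ↔ pyg lab z = La) := by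
    intro z hz0 hz1
    constructor
    · intro hz; exact (hLab z a hz0 hz1 ha0 ha1).mp (by rw [hz, hrta])
    · intro hz
      have := (hLab z a hz0 hz1 ha0 ha1).mpr hz
      rw [hrta] at this; exact this
  have hmemb : ∀ z : Int, 0 ≤ z → z < (L : Int) → (rt z = b ↔ pyg lab z = Lb) := by
    intro z hz0 hz1
    constructor
    · intro hz; exact (hLab z b hz0 hz1 hb0 hb1).mp (by rw [hz, hrtb])
    · intro hz
      have := (hLab z b hz0 hz1 hb0 hb1).mpr hz
      rw [hrtb] at this; exact this
  have hmerge : ∀ z : Int, 0 ≤ z → z < (L : Int) → rt z = a ∨ rt z = b →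
      (if rt z = a then b else rt z) = b ∧ F (pyg lab z) = lp := by
    intro z hz0 hz1 hor
    rcases hor with hza | hzb
    · refine ⟨by rw [if_pos hza], ?_⟩
      have hlz : pyg lab z = La := (hmema z hz0 hz1).mp hza
      rw [hlz]
      simp only [hFdef]
      rcases hlab with ⟨h1, h2⟩ | ⟨h1, h2⟩
      · rw [if_neg (by rw [← h2]; exact hLaLb), h1]
      · rw [if_pos h1]
    · have hne : rt z ≠ a := by rw [hzb]; exact Ne.symm hab
      refine ⟨by rw [if_neg hne]; exact hzb, ?_⟩
      have hlz : pyg lab z = Lb := (hmemb z hz0 hz1).mp hzb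
      rw [hlz]
      simp only [hFdef]
      rcases hlab with ⟨h1, h2⟩ | ⟨h1, h2⟩
      · rw [if_pos h2]
      · rw [if_neg (by rw [← h1]; exact fun hc => hLaLb hc.symm), h2]
  have hkeep : ∀ z : Int, 0 ≤ z → z < (L : Int) → ¬(rt z = a ∨ rt z = b) →
      (if rt z = a then b else rt z) = rt z ∧ F (pyg lab z) = pyg lab z ∧
      pyg lab z ≠ lp ∧ pyg lab z ≠ lq := by
    intro z hz0 hz1 hor
    rw [not_or] at hor
    have hlza : pyg lab z ≠ La := fun hc => hor.1 ((hmema z hz0 hz1).mpr hc)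
    have hlzb : pyg lab z ≠ Lb := fun hc => hor.2 ((hmemb z hz0 hz1).mpr hc)
    have hnp : pyg lab z ≠ lp ∧ pyg lab z ≠ lq := by
      rcases hlab with ⟨h1, h2⟩ | ⟨h1, h2⟩
      · exact ⟨by rw [← h1]; exact hlza, by rw [← h2]; exact hlzb⟩
      · exact ⟨by rw [← h2]; exact hlzb, by rw [← h1]; exact hlza⟩
    exact ⟨by rw [if_neg hor.1], by simp only [hFdef]; exact if_neg hnp.2, hnp⟩
  refine ⟨fun z => if rt z = a then b else rt z, fun z => if rt z = a then h z + h b + 1 else h z,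
    ?_, ?_, ?_, ?_, ?_⟩
  · rw [hlen4, hlab', List.length_map, hlablen]
  · -- InvF
    intro z hz0 hz1
    beta_reduce
    rw [hlen4] at hz1
    obtain ⟨⟨hr0, hr1, hrneg⟩, hcl2, hcl3⟩ := hF z hz0 hz1
    refine ⟨?_, ?_, ?_⟩
    · by_cases hza : rt z = a
      · rw [if_pos hza, hlen4]
        exact ⟨hb0, hb1, by rw [hvb]; exact hm0⟩
      · rw [if_neg hza, hlen4]
        refine ⟨hr0, hr1, ?_⟩
        by_cases hzb : rt z = b
        · rw [hzb, hvb]; exact hm0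
        · rw [hvo (rt z) hr0 hza hzb]; exact hrneg
    · intro hneg4
      by_cases hza2 : z = a
      · exfalso; rw [hza2, hva] at hneg4; omega
      · by_cases hzb2 : z = b
        · rw [hzb2, if_neg (by rw [hrtb]; exact Ne.symm hab)]; exact hrtb
        · rw [hvo z hz0 hza2 hzb2] at hneg4
          have hrz := hcl2 hneg4
          rw [if_neg (by rw [hrz]; exact hza2)]; exact hrz
    · intro hpos4
      by_cases hza2 : z = a
      · subst hza2
        rw [hva, hlen4]
        refine ⟨hb1, ?_, ?_⟩
        · rw [if_neg (by rw [hrtb]; exact Ne.symm hab), if_pos hrta, hrtb]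
        · rw [if_neg (by rw [hrtb]; exact Ne.symm hab), if_pos hrta]; omega
      · by_cases hzb2 : z = b
        · exfalso; rw [hzb2, hvb] at hpos4; omega
        · rw [hvo z hz0 hza2 hzb2] at hpos4 ⊢
          obtain ⟨w1, w2, w3⟩ := hcl3 hpos4
          refine ⟨by rw [hlen4]; exact w1, by simp only [w2], ?_⟩
          simp only [w2]
          by_cases hza3 : rt z = a
          · rw [if_pos hza3, if_pos hza3]; omega
          · rw [if_neg hza3, if_neg hza3]; exact w3
  · -- classes ↔ labels
    intro z w hz0 hz1 hw0 hw1
    beta_reduce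
    rw [hlen4] at hz1 hw1
    rw [hlv z hz0 hz1, hlv w hw0 hw1]
    by_cases hz : rt z = a ∨ rt z = b <;> by_cases hw : rt w = a ∨ rt w = b
    · obtain ⟨e1, e2⟩ := hmerge z hz0 hz1 hz
      obtain ⟨e3, e4⟩ := hmerge w hw0 hw1 hw
      rw [e1, e2, e3, e4]
      simp
    · obtain ⟨e1, e2⟩ := hmerge z hz0 hz1 hz
      obtain ⟨e3, e4, e5, _⟩ := hkeep w hw0 hw1 hw
      rw [e1, e2, e3, e4]
      constructor
      · intro hc; exact absurd (Or.inr hc.symm) hw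
      · intro hc; exact absurd hc.symm e5
    · obtain ⟨e1, e2, e5, _⟩ := hkeep z hz0 hz1 hz
      obtain ⟨e3, e4⟩ := hmerge w hw0 hw1 hw
      rw [e1, e2, e3, e4]
      constructor
      · intro hc; exact absurd (Or.inr hc) hz
      · intro hc; exact absurd hc e5
    · obtain ⟨e1, e2, _, _⟩ := hkeep z hz0 hz1 hz
      obtain ⟨e3, e4, _, _⟩ := hkeep w hw0 hw1 hw
      rw [e1, e2, e3, e4]
      exact hLab z w hz0 hz1 hw0 hw1
  · -- sizes
    intro z hz0 hz1
    beta_reduce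
    rw [hlen4] at hz1
    rw [hlv z hz0 hz1]
    by_cases hz : rt z = a ∨ rt z = b
    · obtain ⟨e1, e2⟩ := hmerge z hz0 hz1 hz
      rw [e1, e2, hvb, hm', hcount_lp]
      push_cast
      ring
    · obtain ⟨e1, e2, e5, e6⟩ := hkeep z hz0 hz1 hz
      rw [e1, e2]
      rw [not_or] at hz
      have hroot := (hF z hz0 hz1).1
      rw [hvo (rt z) hroot.1 hz.1 hz.2]
      rw [hlab', hFdef, count_map_relabel_ne lab lp lq (pyg lab z) e5 e6]
      exact hSz z hz0 hz1
  · -- height bound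
    intro z hz0 hz1
    beta_reduce
    rw [hlen4] at hz1
    rw [hlv z hz0 hz1]
    by_cases hz : rt z = a ∨ rt z = b
    · obtain ⟨_, e2⟩ := hmerge z hz0 hz1 hz
      rw [e2, hcount_lp]
      have hhb : h b < lab.count Lb := by
        have := hH b hb0 hb1; rw [← hLb] at this; exact this
      rcases hz with hza | hzb
      · rw [if_pos hza]
        have hlz : pyg lab z = La := (hmema z hz0 hz1).mp hza
        have := hH z hz0 hz1; rw [hlz] at this
        omega
      · rw [if_neg (by rw [hzb]; exact Ne.symm hab)]
        have hlz : pyg lab z = Lb := (hmemb z hz0 hz1).mp hzb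
        have := hH z hz0 hz1; rw [hlz] at this
        omega
    · obtain ⟨_, e2, e5, e6⟩ := hkeep z hz0 hz1 hz
      rw [not_or] at hz
      rw [e2, if_neg hz.1, hlab', hFdef, count_map_relabel_ne lab lp lq (pyg lab z) e5 e6]
      exact hH z hz0 hz1

lemma ufUnion_spec (uf lab : List Int) (rt : Int → Int) (h : Int → Nat) (n ix iy : Int)
    (hInv : InvC uf lab rt h)
    (hx0 : 0 ≤ ix) (hx1 : ix < (uf.length : Int)) (hy0 : 0 ≤ iy) (hy1 : iy < (uf.length : Int)) :
    (ufUnion uf n ix iy).1.length = uf.length ∧ UFRel (ufUnion uf n ix iy).1 (bMerge lab ix iy) := by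
  obtain ⟨hf1r, hf1l, hInv1⟩ := ufFind_invC uf lab rt h ix hInv hx0 hx1
  set uf1 := (ufFind uf.length uf ix).1 with huf1
  have e1 : ufFind uf.length uf ix = (uf1, rt ix) := by
    rw [← hf1r]
  obtain ⟨hf2r, hf2l, hInv2⟩ := ufFind_invC uf1 lab rt h iy hInv1 hy0 (by rw [hf1l]; exact hy1)
  set uf2 := (ufFind uf1.length uf1 iy).1 with huf2
  have e2 : ufFind uf1.length uf1 iy = (uf2, rt iy) := by
    rw [← hf2r]
  have hlen2 : uf2.length = uf.length := by rw [hf2l, hf1l]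
  have hU0 : ufUnion uf n ix iy =
      (if rt ix = rt iy then (uf2, n)
       else
        let s1 := ufSize uf2 (rt ix)
        let s2 := ufSize s1.1 (rt iy)
        let ab : Int × Int := if s2.2 < s1.2 then (rt iy, rt ix) else (rt ix, rt iy)
        let uf3 := pyset s2.1 ab.2 (pyg s2.1 ab.2 + pyg s2.1 ab.1)
        let uf4 := pyset uf3 ab.1 ab.2
        (uf4, n - 1)) := by
    rw [ufUnion, e1, e2]
  by_cases heq : rt ix = rt iy
  · -- same class: A only path-compresses, B leaves lab unchanged
    have hlabeq : pyg lab ix = pyg lab iy :=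
      (hInv.2.2.1 ix iy hx0 hx1 hy0 hy1).mp heq
    have hB : bMerge lab ix iy = lab := by
      rw [bMerge]
      simp [hlabeq]
    rw [hU0, if_pos heq, hB]
    exact ⟨hlen2, rt, h, hInv2⟩
  · -- different classes: a real merge
    obtain ⟨hlen', hF2, hLab2, hSz2, hH2⟩ := hInv2
    have hx1' : ix < (uf2.length : Int) := by rw [hlen2]; exact hx1
    have hy1' : iy < (uf2.length : Int) := by rw [hlen2]; exact hy1
    obtain ⟨hrx0, hrx1, hrxneg⟩ := (hF2 ix hx0 hx1').1
    obtain ⟨hry0, hry1, hryneg⟩ := (hF2 iy hy0 hy1').1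
    have hpos : 0 < uf2.length := by omega
    have es1 : ufSize uf2 (rt ix) = (uf2, -(pyg uf2 (rt ix))) := by
      rw [ufSize, ufFind_root uf2.length uf2 (rt ix) hpos hrxneg]
    have es2 : ufSize uf2 (rt iy) = (uf2, -(pyg uf2 (rt iy))) := by
      rw [ufSize, ufFind_root uf2.length uf2 (rt iy) hpos hryneg]
    have hlabne : pyg lab ix ≠ pyg lab iy := fun hc =>
      heq ((hInv.2.2.1 ix iy hx0 hx1 hy0 hy1).mpr hc)
    have hB : bMerge lab ix iy =
        lab.map (fun l => if l = pyg lab iy then pyg lab ix else l) := by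
      rw [bMerge]
      simp [hlabne]
    have hlabx1 : pyg lab (rt ix) = pyg lab ix := by
      refine (hLab2 (rt ix) ix hrx0 hrx1 hx0 hx1').mp ?_
      exact (hF2 (rt ix) hrx0 hrx1).2.1 hrxneg
    have hlaby1 : pyg lab (rt iy) = pyg lab iy := by
      refine (hLab2 (rt iy) iy hry0 hry1 hy0 hy1').mp ?_
      exact (hF2 (rt iy) hry0 hry1).2.1 hryneg
    rw [hU0, if_neg heq, es1]
    simp only
    rw [es2]
    simp only
    set hInvC2 : InvC uf2 lab rt h := ⟨hlen', hF2, hLab2, hSz2, hH2⟩ with hIC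
    by_cases hcmp : -(pyg uf2 (rt iy)) < -(pyg uf2 (rt ix))
    · rw [if_pos hcmp]
      simp only
      refine ⟨?_, ?_⟩
      · rw [length_pyset, length_pyset, hlen2]
      · rw [hB]
        exact merge_spec uf2 lab rt h (rt iy) (rt ix) (pyg lab ix) (pyg lab iy) hInvC2
          hry0 hry1 hrx0 hrx1 hryneg hrxneg (fun hc => heq hc.symm)
          (Or.inr ⟨hlaby1, hlabx1⟩)
    · rw [if_neg hcmp]
      simp only
      refine ⟨?_, ?_⟩
      · rw [length_pyset, length_pyset, hlen2]
      · rw [hB]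
        exact merge_spec uf2 lab rt h (rt ix) (rt iy) (pyg lab ix) (pyg lab iy) hInvC2
          hrx0 hrx1 hry0 hry1 hrxneg hryneg heq
          (Or.inl ⟨hlabx1, hlaby1⟩)

lemma inner_fold (XYI : List (Int × Int × Int)) (xp yp ip : Int)
    (hcnd : ∀ u ∈ XYI, ((xp > u.1 ∧ yp > u.2.1) ∨ (xp < u.1 ∧ yp < u.2.1)) →
      (0 ≤ ip ∧ ip < (XYI.length : Int)) ∧ (0 ≤ u.2.2 ∧ u.2.2 < (XYI.length : Int))) :
    ∀ (qs : List Int) (st : List Int × Int) (lab : List Int),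
      (∀ q ∈ qs, 0 ≤ q ∧ q < (XYI.length : Int)) →
      st.1.length = XYI.length → UFRel st.1 lab →
      (qs.foldl (aInner xp yp ip XYI) st).1.length = XYI.length ∧
      UFRel (qs.foldl (aInner xp yp ip XYI) st).1 (qs.foldl (bInner xp yp ip XYI) lab) := by
  intro qs
  induction qs with
  | nil => intro st lab _ hl hR; exact ⟨hl, hR⟩
  | cons q qs ih =>
    intro st lab hqs hl hR
    simp only [List.foldl_cons]
    obtain ⟨hq0, hq1⟩ := hqs q (List.mem_cons_self)
    have hsome : PySem.List.pyGet? XYI q = some (XYI[q.toNat]'(by omega)) :=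
      PySem.List.pyGet?_eq_some_getElem XYI hq0 hq1
    have hmem : XYI[q.toNat]'(by omega) ∈ XYI := List.getElem_mem _
    have hrest : ∀ q' ∈ qs, 0 ≤ q' ∧ q' < (XYI.length : Int) := fun q' hq' =>
      hqs q' (List.mem_cons_of_mem q hq')
    rw [aInner, bInner, hsome]
    simp only [Option.getD_some]
    by_cases hcond :
        (xp > (XYI[q.toNat]'(by omega)).1 ∧ yp > (XYI[q.toNat]'(by omega)).2.1) ∨
        (xp < (XYI[q.toNat]'(by omega)).1 ∧ yp < (XYI[q.toNat]'(by omega)).2.1)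
    · rw [if_pos hcond, if_pos hcond]
      obtain ⟨⟨hip0, hip1⟩, hiq0, hiq1⟩ := hcnd _ hmem hcond
      obtain ⟨rt, h, hInv⟩ := hR
      obtain ⟨hlu, hrel⟩ := ufUnion_spec st.1 lab rt h st.2 ip (XYI[q.toNat]'(by omega)).2.2 hInv
        hip0 (by rw [hl]; exact hip1) hiq0 (by rw [hl]; exact hiq1)
      exact ih _ _ hrest (by rw [hlu, hl]) hrel
    · rw [if_neg hcond, if_neg hcond]
      exact ih _ _ hrest hl hR

lemma outer_fold (XYI : List (Int × Int × Int)) (hPre : Pre_solve_exact XYI) :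
    ∀ (ps : List Int) (st : List Int × Int) (lab : List Int),
      (∀ p ∈ ps, 0 ≤ p ∧ p < (XYI.length : Int)) →
      st.1.length = XYI.length → UFRel st.1 lab →
      (ps.foldl (aOuter XYI) st).1.length = XYI.length ∧
      UFRel (ps.foldl (aOuter XYI) st).1 (ps.foldl (bOuter XYI) lab) := by
  intro ps
  induction ps with
  | nil => intro st lab _ hl hR; exact ⟨hl, hR⟩
  | cons p ps ih =>
    intro st lab hps hl hR
    simp only [List.foldl_cons]
    obtain ⟨hp0, hp1⟩ := hps p (List.mem_cons_self)
    have hsome : PySem.List.pyGet? XYI p = some (XYI[p.toNat]'(by omega)) :=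
      PySem.List.pyGet?_eq_some_getElem XYI hp0 hp1
    have hmem : XYI[p.toNat]'(by omega) ∈ XYI := List.getElem_mem _
    have hrest : ∀ p' ∈ ps, 0 ≤ p' ∧ p' < (XYI.length : Int) := fun p' hp' =>
      hps p' (List.mem_cons_of_mem p hp')
    rw [aOuter, bOuter, hsome]
    simp only [Option.getD_some]
    have hqs : ∀ q ∈ PySem.List.pyRange (p + 1) XYI.length 1, 0 ≤ q ∧ q < (XYI.length : Int) := by
      intro q hq
      rw [PySem.List.mem_pyRange_one] at hq
      omega
    have hcnd : ∀ u ∈ XYI,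
        (((XYI[p.toNat]'(by omega)).1 > u.1 ∧ (XYI[p.toNat]'(by omega)).2.1 > u.2.1) ∨
         ((XYI[p.toNat]'(by omega)).1 < u.1 ∧ (XYI[p.toNat]'(by omega)).2.1 < u.2.1)) →
        (0 ≤ (XYI[p.toNat]'(by omega)).2.2 ∧ (XYI[p.toNat]'(by omega)).2.2 < (XYI.length : Int)) ∧
        (0 ≤ u.2.2 ∧ u.2.2 < (XYI.length : Int)) :=
      fun u hu hc => hPre _ hmem u hu hc
    obtain ⟨hl', hR'⟩ := inner_fold XYI _ _ _ hcnd
      (PySem.List.pyRange (p + 1) XYI.length 1) st lab hqs hl hR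
    exact ih _ _ hrest hl' hR'

lemma readout_fold (lab : List Int) :
    ∀ (is_ : List Int) (uf : List Int) (acc : List Int),
      UFRel uf lab → (∀ i ∈ is_, 0 ≤ i ∧ i < (uf.length : Int)) →
      (is_.foldl (fun acc i => let s := ufSize acc.1 i; (s.1, acc.2 ++ [s.2])) (uf, acc)).2 =
        acc ++ is_.map (fun i => (lab.count (pyg lab i) : Int)) := by
  intro is_
  induction is_ with
  | nil => intro uf acc _ _; simp [List.foldl_nil]
  | cons i is ih =>
    intro uf acc hR his
    obtain ⟨hi0, hi1⟩ := his i (List.mem_cons_self)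
    obtain ⟨rt, h, hInv⟩ := hR
    obtain ⟨hfr, hfl, hInv'⟩ := ufFind_invC uf lab rt h i hInv hi0 hi1
    have hsz : pyg (ufFind uf.length uf i).1 (rt i) = -(lab.count (pyg lab i) : Int) := by
      have := hInv'.2.2.2.1 i hi0 (by rw [hfl]; exact hi1)
      exact this
    have es : ufSize uf i = ((ufFind uf.length uf i).1, (lab.count (pyg lab i) : Int)) := by
      show ((ufFind uf.length uf i).1,
        -(pyg (ufFind uf.length uf i).1 (ufFind uf.length uf i).2)) = _
      rw [hfr, hsz]
      simp
    simp only [List.foldl_cons, es]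
    rw [ih (ufFind uf.length uf i).1 (acc ++ [(lab.count (pyg lab i) : Int)])
      ⟨rt, h, hInv'⟩ (by intro j hj; rw [hfl]; exact his j (List.mem_cons_of_mem i hj))]
    simp

lemma pyg_replicate_neg_one (N : Nat) (x : Int) (h0 : 0 ≤ x) (h1 : x < (N : Int)) :
    pyg (List.replicate N (-1 : Int)) x = -1 := by
  have hx : x.toNat < N := by omega
  rw [pyg_nonneg _ _ h0]
  simp [List.getD, hx]

lemma pyg_pyRange (N : Nat) (x : Int) (h0 : 0 ≤ x) (h1 : x < (N : Int)) :
    pyg (PySem.List.pyRange 0 N 1) x = x := by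
  have hx : x.toNat < N := by omega
  rw [pyg_nonneg _ _ h0, PySem.List.pyRange_one]
  simp [List.getD, hx]
  omega

lemma rel_init (N : Nat) : UFRel (List.replicate N (-1)) (PySem.List.pyRange 0 N 1) := by
  refine ⟨id, fun _ => 0, ?_, ?_, ?_, ?_, ?_⟩
  · simp [PySem.List.length_pyRange_one]
  · intro x h0 h1
    simp only [List.length_replicate] at h1
    have := pyg_replicate_neg_one N x h0 h1
    refine ⟨⟨h0, by simpa using h1, by simp only [id]; omega⟩, fun _ => rfl, fun hge => ?_⟩
    · omega
  · intro x y hx0 hx1 hy0 hy1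
    simp only [List.length_replicate] at hx1 hy1
    rw [pyg_pyRange N x hx0 hx1, pyg_pyRange N y hy0 hy1]
    simp
  · intro x h0 h1
    simp only [List.length_replicate] at h1
    simp only [id]
    rw [pyg_pyRange N x h0 h1, pyg_replicate_neg_one N x h0 h1]
    have hmem : x ∈ PySem.List.pyRange 0 (N : Int) 1 := by
      rw [PySem.List.mem_pyRange_one]; omega
    have hnd : (PySem.List.pyRange 0 (N : Int) 1).Nodup := PySem.List.nodup_pyRange_one 0 N
    have : (PySem.List.pyRange 0 (N : Int) 1).count x = 1 := List.count_eq_one_of_mem hnd hmem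
    simp [this]
  · intro x h0 h1
    simp only [List.length_replicate] at h1
    rw [pyg_pyRange N x h0 h1]
    have hmem : x ∈ PySem.List.pyRange 0 (N : Int) 1 := by
      rw [PySem.List.mem_pyRange_one]; omega
    have := List.count_pos_iff.mpr hmem
    omega

-- ===== VERDICT (by name: the statement is the Claim_ definition above) =====
theorem solve_exact_spec : Claim_equal_solve_exact := by
  intro XYI _ hPre
  rw [Spec_solve_exact, solve_exact, solve_exact_alt]
  simp only
  have hps : ∀ p ∈ PySem.List.pyRange 0 (XYI.length : Int) 1, 0 ≤ p ∧ p < (XYI.length : Int) := by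
    intro p hp
    rw [PySem.List.mem_pyRange_one] at hp
    omega
  obtain ⟨hlf, hRf⟩ := outer_fold XYI hPre (PySem.List.pyRange 0 (XYI.length : Int) 1)
    (List.replicate XYI.length (-1), (XYI.length : Int)) (PySem.List.pyRange 0 (XYI.length : Int) 1)
    hps (by simp) (rel_init XYI.length)
  set st := (PySem.List.pyRange 0 (XYI.length : Int) 1).foldl (aOuter XYI)
    (List.replicate XYI.length (-1), (XYI.length : Int)) with hst
  set labF := (PySem.List.pyRange 0 (XYI.length : Int) 1).foldl (bOuter XYI)
    (PySem.List.pyRange 0 (XYI.length : Int) 1) with hlabF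
  rw [readout_fold labF (PySem.List.pyRange 0 (XYI.length : Int) 1) st.1 [] hRf
    (by intro i hi; rw [PySem.List.mem_pyRange_one] at hi; rw [hlf]; omega)]
  simp [PySem.List.count_eq]
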